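-- pv_equiv track=rewrite | github.com/Phucptit2003/Python-PTIT | soluongchuso0.py | max_zeros_in_combinations
-- ===== SOURCE A (Python) =====
-- def count_zeros_in_number(number, divisor):
--     count = 0
--     while number % divisor == 0:
--         number //= divisor
--         count += 1
--     return count
--
-- def max_zeros_in_combinations(arr, k):
--     cnt2_arr = [count_zeros_in_number(num, 2) for num in arr]
--     cnt5_arr = [count_zeros_in_number(num, 5) for num in arr]
--
--     n = len(arr)
--     maxx = 0
--
--     for mask in range(1 << n):
--         if bin(mask).count('1') == k:
--             cnt10 = 0
--             cnt2 = 0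
--             cnt5 = 0
--             for i in range(n):
--                 if mask & (1 << i):
--                     cnt10 += count_zeros_in_number(arr[i], 10)
--                     cnt2 += cnt2_arr[i]
--                     cnt5 += cnt5_arr[i]
--
--             maxx = max(maxx, cnt10 + min(cnt2, cnt5))
--
--     return maxx
-- ===== SOURCE B (Python) =====
-- def count_zeros_in_number(number, divisor):
--     count = 0
--     while number % divisor == 0:
--         number //= divisor
--         count += 1
--     return count
--
--
-- def max_zeros_in_combinations(arr, k):
--     # choose/skip recursion pruned to exactly-k subsets: enumerates only the
--     # C(n, k) size-k subsets instead of all 2^n bitmasks.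
--     ts = [(count_zeros_in_number(x, 2),
--            count_zeros_in_number(x, 5),
--            count_zeros_in_number(x, 10)) for x in arr]
--
--     def go(items, need):
--         # aggregate (sum2, sum5, sum10) of every subset of `items` with exactly `need` elements
--         if need < 0 or need > len(items):
--             return []
--         if need == 0:
--             return [(0, 0, 0)]
--         t, rest = items[0], items[1:]
--         take = [(a + t[0], b + t[1], c + t[2]) for (a, b, c) in go(rest, need - 1)]
--         return take + go(rest, need)
--
--     best = 0
--     for (a, b, c) in go(ts, k):
--         best = max(best, c + min(a, b))
--     return best
-- ===== Notes on version B (the rewrite author's own statement) =====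
-- stated objective: alternative
-- what changed: Replaces the scan of all 2^n bitmasks (filtering by popcount == k) with a choose/skip recursion over a precomputed list of (v2,v5,v10) triples that enumerates only the C(n,k) subsets of size exactly k.
import Mathlib
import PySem

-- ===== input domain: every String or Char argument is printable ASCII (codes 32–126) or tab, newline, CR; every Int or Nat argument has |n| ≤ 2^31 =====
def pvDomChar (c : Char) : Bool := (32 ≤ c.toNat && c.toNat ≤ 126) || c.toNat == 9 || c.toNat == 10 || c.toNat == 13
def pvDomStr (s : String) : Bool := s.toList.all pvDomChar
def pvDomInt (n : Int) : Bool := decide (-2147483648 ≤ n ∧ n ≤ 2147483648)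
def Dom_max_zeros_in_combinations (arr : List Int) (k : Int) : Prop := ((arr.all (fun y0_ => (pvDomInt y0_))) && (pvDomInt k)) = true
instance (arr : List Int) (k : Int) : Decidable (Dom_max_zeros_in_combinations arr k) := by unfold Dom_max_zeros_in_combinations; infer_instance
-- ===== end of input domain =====

-- B replaces A's scan of all 2^n bitmasks by a choose/skip recursion that
-- enumerates only the size-k subsets (objective: alternative).

-- ===== PORT A =====
-- while number % divisor == 0: number //= divisor; count += 1
-- fuel |number|+1 strictly exceeds the number of iterations for number ≠ 0
-- (the loop runs at most log2|number| times), so the port is exact wherever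
-- the Python loop terminates; on number = 0 Python never returns.
def czAux : Nat → Int → Int → Int
  | 0, _, _ => 0
  | fuel + 1, number, divisor =>
    if PySem.Int.mod number divisor = 0 then
      czAux fuel (PySem.Int.floordiv number divisor) divisor + 1
    else 0

def count_zeros_in_number (number : Int) (divisor : Int) : Int :=
  czAux (number.natAbs + 1) number divisor

-- bin(mask).count('1'): the number of 1 bits of mask (mask ≥ 0 here)
def popcount (m : Nat) : Nat :=
  if h : m = 0 then 0 else m % 2 + popcount (m / 2)
decreasing_by exact Nat.div_lt_self (Nat.pos_of_ne_zero h) one_lt_two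

-- 'mask & (1 << i)' nonzero is ported as Nat.testBit mask i (exact for mask ≥ 0)
def max_zeros_in_combinations (arr : List Int) (k : Int) : Int :=
  let cnt2_arr := arr.map (fun num => count_zeros_in_number num 2)
  let cnt5_arr := arr.map (fun num => count_zeros_in_number num 5)
  let n := arr.length
  (List.range (2 ^ n)).foldl (fun maxx mask =>
    if (popcount mask : Int) = k then
      let s := (List.range n).foldl (fun (s : Int × Int × Int) i =>
        if mask.testBit i then
          (s.1 + count_zeros_in_number (arr.getD i 0) 10,
           s.2.1 + cnt2_arr.getD i 0,
           s.2.2 + cnt5_arr.getD i 0)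
        else s) (0, 0, 0)
      max maxx (s.1 + min s.2.1 s.2.2)
    else maxx) 0

-- ===== PORT B =====
-- go(items, need): aggregates (sum2, sum5, sum10) of every subset of items of size exactly need
def goB : List (Int × Int × Int) → Int → List (Int × Int × Int)
  | ts, need =>
    if need < 0 ∨ need > (ts.length : Int) then []
    else if need = 0 then [((0 : Int), (0 : Int), (0 : Int))]
    else
      match ts with
      | [] => []  -- unreachable: need > 0 and need ≤ length = 0 contradict
      | t :: rest =>
        ((goB rest (need - 1)).map (fun s => (s.1 + t.1, s.2.1 + t.2.1, s.2.2 + t.2.2)))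
          ++ goB rest need

def max_zeros_in_combinations_alt (arr : List Int) (k : Int) : Int :=
  let ts := arr.map (fun x =>
    (count_zeros_in_number x 2, count_zeros_in_number x 5, count_zeros_in_number x 10))
  (goB ts k).foldl (fun best s => max best (s.2.2 + min s.1 s.2.1)) 0

-- ===== PRECONDITION & SPEC =====
def Spec_max_zeros_in_combinations (arr : List Int) (k : Int) (out : Int) : Prop := out = max_zeros_in_combinations_alt arr k
instance (arr : List Int) (k : Int) (out : Int) : Decidable (Spec_max_zeros_in_combinations arr k out) := by unfold Spec_max_zeros_in_combinations; infer_instance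

-- ===== CLAIM (what is proved, stated in full; the proofs are below) =====
def Claim_equal_max_zeros_in_combinations : Prop := ∀ (arr : List Int) (k : Int), Dom_max_zeros_in_combinations arr k → Spec_max_zeros_in_combinations arr k (max_zeros_in_combinations arr k)

-- ===== LEMMAS AND PROOFS =====

-- proof-side vocabulary
def tsOf (arr : List Int) : List (Int × Int × Int) :=
  arr.map (fun x =>
    (count_zeros_in_number x 2, count_zeros_in_number x 5, count_zeros_in_number x 10))

-- aggregate (sum2, sum5, sum10) of the subset selected by the bits of m
def aggOf : List (Int × Int × Int) → Nat → Int × Int × Int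
  | [], _ => (0, 0, 0)
  | t :: ts, m =>
    if m % 2 = 1 then
      let s := aggOf ts (m / 2)
      (s.1 + t.1, s.2.1 + t.2.1, s.2.2 + t.2.2)
    else aggOf ts (m / 2)

def maskAggs (ts : List (Int × Int × Int)) (k : Int) : List (Int × Int × Int) :=
  ((List.range (2 ^ ts.length)).filter (fun m => decide ((popcount m : Int) = k))).map (aggOf ts)

def Fmax (L : List (Int × Int × Int)) (c : Int) : Int :=
  L.foldl (fun best s => max best (s.2.2 + min s.1 s.2.1)) c

theorem popcount_zero : popcount 0 = 0 := by rw [popcount]; simp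

theorem popcount_two_mul (i : Nat) : popcount (2 * i) = popcount i := by
  rcases Nat.eq_zero_or_pos i with h | h
  · simp [h]
  · rw [popcount]
    have h2 : ¬ (2 * i = 0) := by omega
    simp [h2, Nat.mul_mod_right, Nat.mul_div_cancel_left _ (by norm_num : 0 < 2)]

theorem popcount_two_mul_add_one (i : Nat) : popcount (2 * i + 1) = popcount i + 1 := by
  rw [popcount]
  have h2 : ¬ (2 * i + 1 = 0) := by omega
  have hm : (2 * i + 1) % 2 = 1 := by omega
  have hd : (2 * i + 1) / 2 = i := by omega
  simp [hm, hd]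
  omega

theorem popcount_le (n : Nat) : ∀ m < 2 ^ n, popcount m ≤ n := by
  induction n with
  | zero => intro m hm; interval_cases m; simp [popcount_zero]
  | succ n ih =>
    intro m hm
    rcases Nat.eq_zero_or_pos m with h | h
    · simp [h, popcount_zero]
    · rw [popcount]
      have h2 : ¬ (m = 0) := by omega
      have hd : m / 2 < 2 ^ n := by omega
      have := ih (m / 2) hd
      have : m % 2 ≤ 1 := by omega
      simp [h2]
      have := ih (m / 2) hd
      omega

theorem aggOf_even (t : Int × Int × Int) (ts : List (Int × Int × Int)) (i : Nat) :
    aggOf (t :: ts) (2 * i) = aggOf ts i := by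
  have hm : (2 * i) % 2 = 0 := by omega
  have hd : (2 * i) / 2 = i := by omega
  simp [aggOf, hm, hd]

theorem aggOf_odd (t : Int × Int × Int) (ts : List (Int × Int × Int)) (i : Nat) :
    aggOf (t :: ts) (2 * i + 1) =
      ((aggOf ts i).1 + t.1, (aggOf ts i).2.1 + t.2.1, (aggOf ts i).2.2 + t.2.2) := by
  have hm : (2 * i + 1) % 2 = 1 := by omega
  have hd : (2 * i + 1) / 2 = i := by omega
  simp [aggOf, hm, hd]

theorem inner_eq (arr : List Int) (mask : Nat) (s : Int × Int × Int) :
    (List.range arr.length).foldl (fun (s : Int × Int × Int) i =>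
        if mask.testBit i then
          (s.1 + count_zeros_in_number (arr.getD i 0) 10,
           s.2.1 + (arr.map (fun num => count_zeros_in_number num 2)).getD i 0,
           s.2.2 + (arr.map (fun num => count_zeros_in_number num 5)).getD i 0)
        else s) s
    = (s.1 + (aggOf (tsOf arr) mask).2.2,
       s.2.1 + (aggOf (tsOf arr) mask).1,
       s.2.2 + (aggOf (tsOf arr) mask).2.1) := by
  induction arr generalizing mask s with
  | nil => simp [tsOf, aggOf]
  | cons x arr ih =>
    rw [List.length_cons, List.range_succ_eq_map, List.foldl_cons, List.foldl_map]
    simp only [Nat.succ_eq_add_one, Nat.testBit_add_one, List.map_cons,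
      List.getD_cons_succ, List.getD_cons_zero]
    rw [ih]
    by_cases hb : mask.testBit 0
    · have hm : mask % 2 = 1 := by revert hb; simp [Nat.testBit_zero]
      simp only [hb, if_true, tsOf, List.map_cons, aggOf, hm]
      simp only [Prod.ext_iff]
      refine ⟨by ring, by ring, by ring⟩
    · have hm : ¬ (mask % 2 = 1) := by revert hb; simp [Nat.testBit_zero]
      simp only [hb, if_false, tsOf, List.map_cons, aggOf, hm]
      simp

theorem A_eq (arr : List Int) (k : Int) :
    max_zeros_in_combinations arr k = Fmax (maskAggs (tsOf arr) k) 0 := by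
  unfold max_zeros_in_combinations
  simp only [inner_eq, zero_add]
  rw [PySem.List.foldl_ite_eq_foldl_filter
    (p := fun mask => ((popcount mask : Int) = k))
    (f := fun maxx mask => max maxx ((aggOf (tsOf arr) mask).2.2 +
      min (aggOf (tsOf arr) mask).1 (aggOf (tsOf arr) mask).2.1))]
  unfold Fmax maskAggs
  rw [List.foldl_map]
  simp [tsOf]

theorem range_two_mul_perm (m : Nat) :
    (List.range (2 * m)).Perm
      ((List.range m).map (fun i => 2 * i) ++ (List.range m).map (fun i => 2 * i + 1)) := by
  induction m with
  | zero => simp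
  | succ m ih =>
    have e1 : 2 * (m + 1) = (2 * m) + 1 + 1 := by omega
    rw [e1, List.range_succ, List.range_succ, List.range_succ, List.map_append,
      List.map_append, List.map_cons, List.map_nil, List.map_cons, List.map_nil]
    refine ((ih.append_right [2 * m]).append_right [2 * m + 1]).trans ?_
    simp only [List.append_assoc]
    refine List.Perm.append_left _ ?_
    have h3 := (List.perm_append_comm
      (l₁ := (List.range m).map (fun i => 2 * i + 1)) (l₂ := [2 * m])).append_right [2 * m + 1]
    simp only [List.cons_append, List.nil_append, List.append_assoc] at h3 ⊢
    exact h3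

theorem maskAggs_cons (t : Int × Int × Int) (ts : List (Int × Int × Int)) (k : Int) :
    (maskAggs (t :: ts) k).Perm
      (((maskAggs ts (k - 1)).map (fun s => (s.1 + t.1, s.2.1 + t.2.1, s.2.2 + t.2.2)))
        ++ maskAggs ts k) := by
  have hE : (((List.range (2 ^ ts.length)).map (fun i => 2 * i)).filter
        (fun m => decide ((popcount m : Int) = k))).map (aggOf (t :: ts))
      = maskAggs ts k := by
    rw [List.filter_map, List.map_map]
    have h1 : (List.range (2 ^ ts.length)).filter
          ((fun m => decide ((popcount m : Int) = k)) ∘ (fun i => 2 * i))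
        = (List.range (2 ^ ts.length)).filter (fun m => decide ((popcount m : Int) = k)) :=
      List.filter_congr (fun i _ => by simp [Function.comp, popcount_two_mul])
    rw [h1]
    exact List.map_congr_left (fun i _ => by simp [Function.comp, aggOf_even])
  have hO : (((List.range (2 ^ ts.length)).map (fun i => 2 * i + 1)).filter
        (fun m => decide ((popcount m : Int) = k))).map (aggOf (t :: ts))
      = (maskAggs ts (k - 1)).map (fun s => (s.1 + t.1, s.2.1 + t.2.1, s.2.2 + t.2.2)) := by
    rw [List.filter_map, List.map_map]
    have h1 : (List.range (2 ^ ts.length)).filter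
          ((fun m => decide ((popcount m : Int) = k)) ∘ (fun i => 2 * i + 1))
        = (List.range (2 ^ ts.length)).filter (fun m => decide ((popcount m : Int) = k - 1)) :=
      List.filter_congr (fun i _ => by
        simp only [Function.comp]
        rw [decide_eq_decide, popcount_two_mul_add_one]
        push_cast
        omega)
    rw [h1]
    unfold maskAggs
    rw [List.map_map]
    exact List.map_congr_left (fun i _ => by simp [Function.comp, aggOf_odd])
  unfold maskAggs
  rw [show (t :: ts).length = ts.length + 1 from rfl,
    show (2 : Nat) ^ (ts.length + 1) = 2 * 2 ^ ts.length by ring]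
  refine (((range_two_mul_perm (2 ^ ts.length)).filter _).map _).trans ?_
  rw [List.filter_append, List.map_append, hE, hO]
  exact List.perm_append_comm

theorem maskAggs_out (ts : List (Int × Int × Int)) (k : Int)
    (h : k < 0 ∨ (ts.length : Int) < k) : maskAggs ts k = [] := by
  unfold maskAggs
  rw [List.filter_eq_nil_iff.mpr ?_]
  · rfl
  · intro m hm
    have hlt : m < 2 ^ ts.length := List.mem_range.mp hm
    have := popcount_le ts.length m hlt
    simp only [decide_eq_true_eq]
    omega

theorem goB_unfold (ts : List (Int × Int × Int)) (need : Int) :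
    goB ts need =
      if need < 0 ∨ need > (ts.length : Int) then []
      else if need = 0 then [((0 : Int), (0 : Int), (0 : Int))]
      else
        match ts with
        | [] => []
        | t :: rest =>
          ((goB rest (need - 1)).map (fun s => (s.1 + t.1, s.2.1 + t.2.1, s.2.2 + t.2.2)))
            ++ goB rest need := by
  rw [goB.eq_def]

theorem maskAggs_perm_goB (ts : List (Int × Int × Int)) (k : Int) :
    (maskAggs ts k).Perm (goB ts k) := by
  induction ts generalizing k with
  | nil =>
    have h1 : maskAggs [] k = if k = 0 then [((0 : Int), (0 : Int), (0 : Int))] else [] := by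
      by_cases hk : k = 0
      · subst hk; simp [maskAggs, popcount_zero, aggOf]
      · rw [maskAggs_out _ _ (by simp; omega)]; simp [hk]
    have h2 : goB [] k = if k = 0 then [((0 : Int), (0 : Int), (0 : Int))] else [] := by
      by_cases hk : k = 0
      · subst hk; rw [goB_unfold]; simp
      · rw [goB_unfold,
          if_pos (by simp; omega : k < 0 ∨ k > ((List.length ([] : List (Int × Int × Int)) : Int)))]
        simp [hk]
    rw [h1, h2]
  | cons t ts ih =>
    refine (maskAggs_cons t ts k).trans ?_
    by_cases h1 : k < 0 ∨ k > ((t :: ts).length : Int)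
    · rw [goB_unfold, if_pos h1]
      have hl : ((t :: ts).length : Int) = (ts.length : Int) + 1 := by
        push_cast [List.length_cons]; ring
      rw [maskAggs_out ts (k - 1) (by omega), maskAggs_out ts k (by omega)]
      simp
    · by_cases h2 : k = 0
      · subst h2
        rw [goB_unfold, if_neg h1, if_pos rfl]
        rw [maskAggs_out ts (0 - 1) (by omega)]
        simp only [List.map_nil, List.nil_append]
        refine (ih 0).trans ?_
        rw [goB_unfold,
          if_neg (show ¬((0 : Int) < 0 ∨ (0 : Int) > (ts.length : Int)) by omega),
          if_pos rfl]
      · rw [goB_unfold, if_neg h1, if_neg h2]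
        exact ((ih (k - 1)).map _).append (ih k)

theorem Fmax_perm {L1 L2 : List (Int × Int × Int)} (h : L1.Perm L2) (c : Int) :
    Fmax L1 c = Fmax L2 c := by
  induction h generalizing c with
  | nil => rfl
  | cons x _ ih => simp only [Fmax, List.foldl_cons] at ih ⊢; exact ih _
  | swap x y l =>
    simp only [Fmax, List.foldl_cons]
    have : max (max c (x.2.2 + min x.1 x.2.1)) (y.2.2 + min y.1 y.2.1)
         = max (max c (y.2.2 + min y.1 y.2.1)) (x.2.2 + min x.1 x.2.1) := by omega
    rw [this]
  | trans _ _ ih1 ih2 => exact (ih1 c).trans (ih2 c)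

theorem B_eq (arr : List Int) (k : Int) :
    max_zeros_in_combinations_alt arr k = Fmax (goB (tsOf arr) k) 0 := rfl

-- ===== VERDICT (by name: the statement is the Claim_ definition above) =====
theorem max_zeros_in_combinations_spec : Claim_equal_max_zeros_in_combinations := by
  intro arr k _
  unfold Spec_max_zeros_in_combinations
  rw [A_eq, B_eq, Fmax_perm (maskAggs_perm_goB (tsOf arr) k)]
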